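-- pv_equiv track=rewrite | github.com/prashanth10112001/Health_Guider | python_services/data_samples.py | extract_appliances
-- ===== SOURCE A (Python) =====
-- def extract_appliances(raw_room: dict) -> dict:
--     """Generate a boolean appliances dictionary based on available list."""
--     if not raw_room or "appliances" not in raw_room:
--         return {}
--
--     appliance_list = raw_room.get("appliances", [])
--     normalized = {}
--     all_possible = ["AC", "CEILING_FAN", "EXHAUST_FAN", "WINDOW", "DOOR"]
--
--     for appliance in all_possible:
--         # Check if a close match exists (case-insensitive, with spaces removed)
--         found = any(a.lower().replace(" ", "_") == appliance.lower() for a in appliance_list)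
--         normalized[appliance] = found
--
--     return normalized
-- ===== SOURCE B (Python) =====
-- def extract_appliances(raw_room: dict) -> dict:
--     """Generate a boolean appliances dictionary based on available list."""
--     if not raw_room or "appliances" not in raw_room:
--         return {}
--
--     appliance_list = raw_room.get("appliances", [])
--     canon = {
--         "ac": "AC",
--         "ceiling_fan": "CEILING_FAN",
--         "exhaust_fan": "EXHAUST_FAN",
--         "window": "WINDOW",
--         "door": "DOOR",
--     }
--     result = {name: False for name in canon.values()}
--     for a in appliance_list:
--         key = a.lower().replace(" ", "_")
--         if key in canon:
--             result[canon[key]] = True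
--     return result
-- ===== Notes on version B (the rewrite author's own statement) =====
-- stated objective: alternative
-- what changed: Instead of scanning the appliance list once per canonical name (five any-scans), B makes a single pass over the appliance list, normalizing each element once and setting flags in a preinitialized all-False result via a lowercase-key lookup table.
import Mathlib
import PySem

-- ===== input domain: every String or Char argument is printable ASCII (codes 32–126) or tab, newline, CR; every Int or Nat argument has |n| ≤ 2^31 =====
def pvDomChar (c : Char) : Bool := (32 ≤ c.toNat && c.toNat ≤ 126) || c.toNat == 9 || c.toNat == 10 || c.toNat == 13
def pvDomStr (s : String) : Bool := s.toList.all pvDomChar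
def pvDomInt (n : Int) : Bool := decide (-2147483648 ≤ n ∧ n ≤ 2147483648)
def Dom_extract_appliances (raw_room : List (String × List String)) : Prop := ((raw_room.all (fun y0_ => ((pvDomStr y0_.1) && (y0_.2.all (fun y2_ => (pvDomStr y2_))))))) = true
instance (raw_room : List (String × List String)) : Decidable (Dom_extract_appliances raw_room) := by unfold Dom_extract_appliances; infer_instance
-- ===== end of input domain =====

-- B replaces A's five scans of the appliance list (one per canonical name) by a single pass
-- that normalizes each element once and sets flags through a lookup table (objective: alternative).

-- ===== PORT A =====
def pvAllPossible : List String := ["AC", "CEILING_FAN", "EXHAUST_FAN", "WINDOW", "DOOR"]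

def extract_appliances (raw_room : List (String × List String)) : List (String × Bool) :=
  if raw_room.isEmpty || !(PySem.Dict.mk raw_room).contains "appliances" then []
  else
    let appliance_list := (PySem.Dict.mk raw_room).getD "appliances" []
    ((pvAllPossible.foldl (fun normalized appliance =>
        normalized.insert appliance
          (appliance_list.any (fun a =>
            PySem.Str.replace (PySem.Str.lower a) " " "_" == PySem.Str.lower appliance)))
      PySem.Dict.empty)).items

-- ===== PORT B =====
-- key = a.lower().replace(" ", "_")
def pvNorm (a : String) : String := PySem.Str.replace (PySem.Str.lower a) " " "_"

def pvCanon : PySem.Dict String String :=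
  PySem.Dict.mk [("ac", "AC"), ("ceiling_fan", "CEILING_FAN"), ("exhaust_fan", "EXHAUST_FAN"),
                 ("window", "WINDOW"), ("door", "DOOR")]

def extract_appliances_alt (raw_room : List (String × List String)) : List (String × Bool) :=
  if raw_room.isEmpty || !(PySem.Dict.mk raw_room).contains "appliances" then []
  else
    let appliance_list := (PySem.Dict.mk raw_room).getD "appliances" []
    let result0 : PySem.Dict String Bool :=
      PySem.Dict.mk (pvCanon.values.map (fun name => (name, false)))
    ((appliance_list.foldl (fun result a =>
        let key := pvNorm a
        if pvCanon.contains key then result.insert (pvCanon.getD key "") true else result)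
      result0)).items

-- ===== PRECONDITION & SPEC =====
def Spec_extract_appliances (raw_room : List (String × List String)) (out : List (String × Bool)) : Prop := out = extract_appliances_alt raw_room
instance (raw_room : List (String × List String)) (out : List (String × Bool)) : Decidable (Spec_extract_appliances raw_room out) := by unfold Spec_extract_appliances; infer_instance

-- ===== CLAIM (what is proved, stated in full; the proofs are below) =====
def Claim_equal_extract_appliances : Prop := ∀ (raw_room : List (String × List String)), Dom_extract_appliances raw_room → Spec_extract_appliances raw_room (extract_appliances raw_room)

-- ===== LEMMAS AND PROOFS =====

-- B's loop invariant: one pass over L from the five preset flags ors each flag with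
-- "some element of L normalizes to the corresponding lowercase key".
set_option maxHeartbeats 1000000 in
lemma b_loop_items (L : List String) (b1 b2 b3 b4 b5 : Bool) :
    ((L.foldl (fun result a =>
        let key := pvNorm a
        if pvCanon.contains key then result.insert (pvCanon.getD key "") true else result)
      (PySem.Dict.mk [("AC", b1), ("CEILING_FAN", b2), ("EXHAUST_FAN", b3),
                      ("WINDOW", b4), ("DOOR", b5)]))).items
    = [("AC", b1 || L.any (fun a => pvNorm a == "ac")),
       ("CEILING_FAN", b2 || L.any (fun a => pvNorm a == "ceiling_fan")),
       ("EXHAUST_FAN", b3 || L.any (fun a => pvNorm a == "exhaust_fan")),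
       ("WINDOW", b4 || L.any (fun a => pvNorm a == "window")),
       ("DOOR", b5 || L.any (fun a => pvNorm a == "door"))] := by
  induction L generalizing b1 b2 b3 b4 b5 with
  | nil => simp
  | cons a L ih =>
    simp only [List.foldl_cons, List.any_cons]
    by_cases h1 : pvNorm a = "ac"
    · simp only [h1, show pvCanon.contains "ac" = true from rfl, if_true]
      rw [show (PySem.Dict.mk [("AC", b1), ("CEILING_FAN", b2), ("EXHAUST_FAN", b3), ("WINDOW", b4), ("DOOR", b5)]).insert (pvCanon.getD "ac" "") true
            = PySem.Dict.mk [("AC", true), ("CEILING_FAN", b2), ("EXHAUST_FAN", b3), ("WINDOW", b4), ("DOOR", b5)] from rfl, ih]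
      simp
    by_cases h2 : pvNorm a = "ceiling_fan"
    · simp only [h2, show pvCanon.contains "ceiling_fan" = true from rfl, if_true]
      rw [show (PySem.Dict.mk [("AC", b1), ("CEILING_FAN", b2), ("EXHAUST_FAN", b3), ("WINDOW", b4), ("DOOR", b5)]).insert (pvCanon.getD "ceiling_fan" "") true
            = PySem.Dict.mk [("AC", b1), ("CEILING_FAN", true), ("EXHAUST_FAN", b3), ("WINDOW", b4), ("DOOR", b5)] from rfl, ih]
      simp
    by_cases h3 : pvNorm a = "exhaust_fan"
    · simp only [h3, show pvCanon.contains "exhaust_fan" = true from rfl, if_true]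
      rw [show (PySem.Dict.mk [("AC", b1), ("CEILING_FAN", b2), ("EXHAUST_FAN", b3), ("WINDOW", b4), ("DOOR", b5)]).insert (pvCanon.getD "exhaust_fan" "") true
            = PySem.Dict.mk [("AC", b1), ("CEILING_FAN", b2), ("EXHAUST_FAN", true), ("WINDOW", b4), ("DOOR", b5)] from rfl, ih]
      simp
    by_cases h4 : pvNorm a = "window"
    · simp only [h4, show pvCanon.contains "window" = true from rfl, if_true]
      rw [show (PySem.Dict.mk [("AC", b1), ("CEILING_FAN", b2), ("EXHAUST_FAN", b3), ("WINDOW", b4), ("DOOR", b5)]).insert (pvCanon.getD "window" "") true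
            = PySem.Dict.mk [("AC", b1), ("CEILING_FAN", b2), ("EXHAUST_FAN", b3), ("WINDOW", true), ("DOOR", b5)] from rfl, ih]
      simp
    by_cases h5 : pvNorm a = "door"
    · simp only [h5, show pvCanon.contains "door" = true from rfl, if_true]
      rw [show (PySem.Dict.mk [("AC", b1), ("CEILING_FAN", b2), ("EXHAUST_FAN", b3), ("WINDOW", b4), ("DOOR", b5)]).insert (pvCanon.getD "door" "") true
            = PySem.Dict.mk [("AC", b1), ("CEILING_FAN", b2), ("EXHAUST_FAN", b3), ("WINDOW", b4), ("DOOR", true)] from rfl, ih]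
      simp
    · have hfalse : pvCanon.contains (pvNorm a) = false := by
        simp [pvCanon, Ne.symm h1, Ne.symm h2, Ne.symm h3, Ne.symm h4, Ne.symm h5]
      have e1 : (pvNorm a == "ac") = false := beq_eq_false_iff_ne.mpr h1
      have e2 : (pvNorm a == "ceiling_fan") = false := beq_eq_false_iff_ne.mpr h2
      have e3 : (pvNorm a == "exhaust_fan") = false := beq_eq_false_iff_ne.mpr h3
      have e4 : (pvNorm a == "window") = false := beq_eq_false_iff_ne.mpr h4
      have e5 : (pvNorm a == "door") = false := beq_eq_false_iff_ne.mpr h5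
      simp only [hfalse, Bool.false_eq_true, if_false, e1, e2, e3, e4, e5, Bool.false_or]
      exact ih b1 b2 b3 b4 b5

-- A's loop over the five literal names, evaluated.
set_option maxHeartbeats 1000000 in
lemma a_loop_items (L : List String) :
    ((pvAllPossible.foldl (fun normalized appliance =>
        normalized.insert appliance
          (L.any (fun a =>
            PySem.Str.replace (PySem.Str.lower a) " " "_" == PySem.Str.lower appliance)))
      PySem.Dict.empty)).items
    = [("AC", L.any (fun a => pvNorm a == "ac")),
       ("CEILING_FAN", L.any (fun a => pvNorm a == "ceiling_fan")),
       ("EXHAUST_FAN", L.any (fun a => pvNorm a == "exhaust_fan")),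
       ("WINDOW", L.any (fun a => pvNorm a == "window")),
       ("DOOR", L.any (fun a => pvNorm a == "door"))] := by
  rfl

theorem extract_appliances_spec : Claim_equal_extract_appliances := by
  intro raw_room _
  unfold Spec_extract_appliances extract_appliances extract_appliances_alt
  by_cases hc : (raw_room.isEmpty || !(PySem.Dict.mk raw_room).contains "appliances") = true
  · rw [if_pos hc, if_pos hc]
  · rw [if_neg hc, if_neg hc]
    rw [a_loop_items, show PySem.Dict.mk ((pvCanon.values).map (fun name => (name, false)))
          = PySem.Dict.mk [("AC", false), ("CEILING_FAN", false), ("EXHAUST_FAN", false),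
                           ("WINDOW", false), ("DOOR", false)] from rfl,
        b_loop_items]
    simp
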